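-- pv_equiv track=rewrite | github.com/rohaquinlop/UVa-Solutions | Solved/p11111 - Generalized Matrioshkas.py | aux
-- ===== SOURCE A (Python) =====
-- def aux(nums, father, idx, n):
-- 	if idx == n:
-- 		return True
-- 	elif n-idx == 2:
-- 		return -1*nums[idx] < father
-- 	ans = True
-- 	internalSum = 0
-- 	openVal = -1
-- 	j = idx
--
-- 	for i in range(idx, n):
-- 		if nums[i] < 0 and openVal == -1:
-- 			openVal = -1*nums[i]
-- 			j = i
-- 		elif nums[i] == openVal:
-- 			ans = ans and aux(nums, openVal, j+1, i)
-- 			openVal = -1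
-- 			j = i
-- 			internalSum += nums[i]
--
-- 	return internalSum < father and ans and j != idx and openVal == -1
-- ===== SOURCE B (Python) =====
-- def aux(nums, father, idx, n):
--     # Single left-to-right pass with an explicit stack of frames, no recursion.
--     # A frame is (father, start, ans, total, open, j); the top frame is always
--     # in closed state (open == -1).  A positive value closes the OUTERMOST
--     # frame whose open value equals it; the frames above it are finalized as
--     # the abandoned segment they are and discarded.
--     frames = [(father, idx, True, 0, -1, idx)]
--     for i in range(idx, n):
--         x = nums[i]
--         if x < 0:
--             fa, ix, ans, total, _, _ = frames.pop()
--             frames.append((fa, ix, ans, total, -x, i))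
--             frames.append((-x, i + 1, True, 0, -1, i + 1))
--         else:
--             m = None
--             for d in range(len(frames)):
--                 if frames[d][4] == x:
--                     m = d
--                     break
--             if m is not None:
--                 child = _finalize(nums, frames[m + 1], i)
--                 fa, ix, ans, total, _, _ = frames[m]
--                 del frames[m:]
--                 frames.append((fa, ix, ans and child, total + x, -1, i))
--     return _finalize(nums, frames[0], n)
--
--
-- def _finalize(nums, frame, n):
--     fa, ix, ans, total, op, j = frame
--     if ix == n:
--         return True
--     if n - ix == 2:
--         return -nums[ix] < fa
--     return total < fa and ans and j != ix and op == -1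
-- ===== Notes on version B (the rewrite author's own statement) =====
-- stated objective: alternative
-- what changed: A validates each segment by a state-machine rescan plus recursion into every matched interior; B makes ONE left-to-right pass over the whole range with an explicit stack of frames (father, start, ans, total, open, j), closing the outermost frame whose open value matches each positive element and finalizing/discarding the frames above it, with no recursion and no rescans.
-- outside the precondition, e.g. on aux([-3], 0, 0, 2): A returns False, B raises IndexError
import Mathlib
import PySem

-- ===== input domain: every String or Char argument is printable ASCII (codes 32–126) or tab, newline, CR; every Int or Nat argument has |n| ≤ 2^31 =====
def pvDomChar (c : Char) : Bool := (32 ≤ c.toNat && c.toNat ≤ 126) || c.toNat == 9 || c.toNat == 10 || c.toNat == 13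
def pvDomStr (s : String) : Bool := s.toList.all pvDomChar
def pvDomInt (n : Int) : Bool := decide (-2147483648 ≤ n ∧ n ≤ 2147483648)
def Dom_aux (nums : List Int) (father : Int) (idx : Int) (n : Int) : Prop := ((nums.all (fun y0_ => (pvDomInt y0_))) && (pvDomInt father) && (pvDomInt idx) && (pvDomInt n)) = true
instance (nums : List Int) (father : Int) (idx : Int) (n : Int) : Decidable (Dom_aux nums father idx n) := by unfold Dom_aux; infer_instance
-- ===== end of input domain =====

-- B replaces A's recursive per-segment rescans by ONE left-to-right pass over the whole
-- range with an explicit stack of frames; each element is read once by the top-level loop.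

-- ===== PORT A =====
-- the final 'return internalSum < father and ans and j != idx and openVal == -1' of A
def finalizeA (father idx : Int) : Bool × Int × Int × Int → Bool
  | (a, s, o, j) => decide (s < father) && a && decide (j ≠ idx) && decide (o = -1)

-- one iteration of A's 'for i in range(idx, n)' loop on the state (ans, internalSum, openVal, j);
-- 'rec' is the recursive call 'aux(nums, openVal, j+1, i)'
def stepA (rec : Int → Int → Int → Bool) (nums : List Int)
    (st : Bool × Int × Int × Int) (i : Int) : Bool × Int × Int × Int :=
  match st with
  | (ans, sum, openVal, j) =>
    if PySem.List.pyGetD nums i 0 < 0 ∧ openVal = -1 then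
      (ans, sum, -1 * PySem.List.pyGetD nums i 0, i)
    else if PySem.List.pyGetD nums i 0 = openVal then
      (ans && rec openVal (j+1) i, sum + PySem.List.pyGetD nums i 0, -1, i)
    else (ans, sum, openVal, j)

-- A's recursion, with explicit fuel consumed once per nesting level of the Python
-- recursion; the top-level call in 'aux' supplies (n-idx).toNat + 1, always sufficient
def auxF : Nat → List Int → Int → Int → Int → Bool
  | 0, _, _, _, _ => false
  | fuel+1, nums, father, idx, n =>
    if idx = n then true
    else if n - idx = 2 then decide (-1 * PySem.List.pyGetD nums idx 0 < father)
    else finalizeA father idx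
      ((PySem.List.pyRange idx n 1).foldl (stepA (auxF fuel nums) nums) (true, 0, -1, idx))

def aux (nums : List Int) (father : Int) (idx : Int) (n : Int) : Bool :=
  auxF ((n - idx).toNat + 1) nums father idx n

-- ===== PORT B =====
-- a frame of B's stack: (father, start, ans, total, open, j); the last list element is
-- the top of the stack in Source B, here the list keeps Source B's order (bottom first)
abbrev BFrame := Int × Int × Bool × Int × Int × Int

-- B's _finalize(nums, frame, n)
def finalizeB (nums : List Int) (f : BFrame) (n : Int) : Bool :=
  match f with
  | (fa, ix, ans, total, op, j) =>
    if ix = n then true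
    else if n - ix = 2 then decide (-(PySem.List.pyGetD nums ix 0) < fa)
    else decide (total < fa) && ans && decide (j ≠ ix) && decide (op = -1)

-- the x < 0 branch: pop the top frame, re-push it opened, push a fresh child frame
-- ([] is unreachable: the stack is never empty — Python's pop() would raise there)
def openLast (x i : Int) : List BFrame → List BFrame
  | [] => []
  | [(fa, ix, ans, total, _, _)] =>
      [(fa, ix, ans, total, -x, i), (-x, i+1, true, 0, -1, i+1)]
  | f :: g :: t => f :: openLast x i (g :: t)

-- the bottom-up search 'for d in range(len(frames)): if frames[d][4] == x: …' fused with
-- 'del frames[m:]; frames.append(closed frame)'; none = no frame is expecting x;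
-- the matched frame is open, so its child frame above always exists (headD's default is dead)
def closeFrom (nums : List Int) (x i : Int) : List BFrame → Option (List BFrame)
  | [] => none
  | (fa, ix, ans, total, op, j) :: t =>
      if op = x then
        some [(fa, ix, ans && finalizeB nums (t.headD (0, 0, true, 0, -1, 0)) i, total + x, -1, i)]
      else (closeFrom nums x i t).map (fun fs => (fa, ix, ans, total, op, j) :: fs)

-- one iteration of B's 'for i in range(idx, n)' loop on the frame stack
def stepB (nums : List Int) (frames : List BFrame) (i : Int) : List BFrame :=
  let x := PySem.List.pyGetD nums i 0
  if x < 0 then openLast x i frames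
  else
    match closeFrom nums x i frames with
    | some fs => fs
    | none => frames

def aux_alt (nums : List Int) (father : Int) (idx : Int) (n : Int) : Bool :=
  finalizeB nums
    (((PySem.List.pyRange idx n 1).foldl (stepB nums)
        [(father, idx, true, 0, -1, idx)]).headD (0, 0, true, 0, -1, 0)) n

-- ===== PRECONDITION & SPEC =====
-- Pre_ excludes inputs whose scanned range [idx, n) leaves Python's index bounds
-- [-len, len): A raises IndexError there — except through its length-2 shortcut, which
-- returns -nums[idx] < father without checking that index n-1 exists, while B's
-- element-by-element scan raises IndexError.
def Pre_aux (nums : List Int) (father : Int) (idx : Int) (n : Int) : Prop :=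
  (n ≤ (nums.length : Int) ∧ -(nums.length : Int) ≤ idx) ∨ n ≤ idx
instance (nums : List Int) (father : Int) (idx : Int) (n : Int) : Decidable (Pre_aux nums father idx n) := by unfold Pre_aux; infer_instance
def pvWitness_aux : List Int × Int × Int × Int := ([-2, -1, 1, 2], 7, 0, 4)

def Spec_aux (nums : List Int) (father : Int) (idx : Int) (n : Int) (out : Bool) : Prop := out = aux_alt nums father idx n
instance (nums : List Int) (father : Int) (idx : Int) (n : Int) (out : Bool) : Decidable (Spec_aux nums father idx n out) := by unfold Spec_aux; infer_instance

-- ===== CLAIM (what is proved, stated in full; the proofs are below) =====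
def Claim_equal_aux : Prop := ∀ (nums : List Int) (father : Int) (idx : Int) (n : Int), Dom_aux nums father idx n → Pre_aux nums father idx n → Spec_aux nums father idx n (aux nums father idx n)

-- ===== LEMMAS AND PROOFS =====

-- the semantic recursive call of A (fuel-free wrapper)
def recS (nums : List Int) : Int → Int → Int → Bool := fun fa a b => aux nums fa a b

-- A's loop body with the semantic recursive call
def stepS (nums : List Int) : (Bool × Int × Int × Int) → Int → Bool × Int × Int × Int :=
  stepA (recS nums) nums


theorem stepA_open (r : Int → Int → Int → Bool) (nums : List Int) (ans : Bool) (sum v j i : Int)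
    (h : PySem.List.pyGetD nums i 0 < 0 ∧ v = -1) :
    stepA r nums (ans, sum, v, j) i = (ans, sum, -1 * PySem.List.pyGetD nums i 0, i) := by
  simp only [stepA, if_pos h]

theorem stepA_close (r : Int → Int → Int → Bool) (nums : List Int) (ans : Bool) (sum v j i : Int)
    (h1 : ¬ (PySem.List.pyGetD nums i 0 < 0 ∧ v = -1)) (h2 : PySem.List.pyGetD nums i 0 = v) :
    stepA r nums (ans, sum, v, j) i
      = (ans && r v (j+1) i, sum + PySem.List.pyGetD nums i 0, -1, i) := by
  simp only [stepA, if_neg h1, if_pos h2]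

theorem stepA_skip (r : Int → Int → Int → Bool) (nums : List Int) (ans : Bool) (sum v j i : Int)
    (h1 : ¬ (PySem.List.pyGetD nums i 0 < 0 ∧ v = -1)) (h2 : PySem.List.pyGetD nums i 0 ≠ v) :
    stepA r nums (ans, sum, v, j) i = (ans, sum, v, j) := by
  simp only [stepA, if_neg h1, if_neg h2]

-- Two runs of A's loop with different recursive calls agree as long as the calls agree on
-- the argument triples the loop can produce (fa, j+1, i) with J < j+1 and i < n.
theorem foldl_stepA_congr (nums : List Int) (r r' : Int → Int → Int → Bool) (n J : Int)
    (h : ∀ fa a b, J < a → b < n → r fa a b = r' fa a b) :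
    ∀ (m : Nat) (i : Int), (n - i).toNat = m → J ≤ i →
      ∀ (ans : Bool) (sum v j : Int), J ≤ j →
      (PySem.List.pyRange i n 1).foldl (stepA r nums) (ans, sum, v, j)
        = (PySem.List.pyRange i n 1).foldl (stepA r' nums) (ans, sum, v, j) := by
  intro m
  induction m with
  | zero =>
    intro i hm _ ans sum v j _
    rw [PySem.List.pyRange_one_eq_nil (by omega)]
    rfl
  | succ m ih =>
    intro i hm hJi ans sum v j hJj
    have hin : i < n := by omega
    rw [PySem.List.pyRange_one_cons hin]
    simp only [List.foldl_cons]
    by_cases h1 : PySem.List.pyGetD nums i 0 < 0 ∧ v = -1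
    · rw [stepA_open r nums ans sum v j i h1, stepA_open r' nums ans sum v j i h1]
      exact ih (i+1) (by omega) (by omega) _ _ _ _ (by omega)
    · by_cases h2 : PySem.List.pyGetD nums i 0 = v
      · rw [stepA_close r nums ans sum v j i h1 h2, stepA_close r' nums ans sum v j i h1 h2,
           h v (j+1) i (by omega) hin]
        exact ih (i+1) (by omega) (by omega) _ _ _ _ (by omega)
      · rw [stepA_skip r nums ans sum v j i h1 h2, stepA_skip r' nums ans sum v j i h1 h2]
        exact ih (i+1) (by omega) (by omega) _ _ _ _ hJj

-- fuel is irrelevant once it exceeds the segment length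
theorem auxF_fuel : ∀ (k : Nat) (nums : List Int) (fa a b : Int), (b - a).toNat = k →
    ∀ (F : Nat), (b - a).toNat < F → auxF F nums fa a b = aux nums fa a b := by
  intro k
  induction k using Nat.strong_induction_on with
  | _ k ih =>
    intro nums fa a b hk F hF
    obtain ⟨F', rfl⟩ : ∃ F', F = F' + 1 := ⟨F - 1, by omega⟩
    unfold aux
    rw [auxF, auxF]
    by_cases h1 : a = b
    · simp [h1]
    · by_cases h2 : b - a = 2
      · simp only [if_neg h1, if_pos h2]
      · simp only [if_neg h1, if_neg h2]
        by_cases hab : b ≤ a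
        · rw [PySem.List.pyRange_one_eq_nil hab]
          rfl
        · have hcg : ∀ (r : Int → Int → Int → Bool),
              (∀ fa' a' b', a < a' → b' < b → r fa' a' b' = aux nums fa' a' b') →
              (PySem.List.pyRange a b 1).foldl (stepA r nums) (true, 0, -1, a)
                = (PySem.List.pyRange a b 1).foldl (stepA (fun fa' a' b' => aux nums fa' a' b') nums) (true, 0, -1, a) := by
            intro r hr
            exact foldl_stepA_congr nums r _ b a hr ((b - a).toNat) a rfl le_rfl true 0 (-1) a le_rfl
          rw [hcg (auxF F' nums) (fun fa' a' b' ha hb =>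
                ih ((b' - a').toNat) (by omega) nums fa' a' b' rfl F' (by omega)),
              hcg (auxF ((b - a).toNat) nums) (fun fa' a' b' ha hb =>
                ih ((b' - a').toNat) (by omega) nums fa' a' b' rfl ((b - a).toNat) (by omega))]

-- A's recursion characterized with the fuel-free recursive call
theorem aux_unfold (nums : List Int) (fa idx n : Int) :
    aux nums fa idx n =
      if idx = n then true
      else if n - idx = 2 then decide (-1 * PySem.List.pyGetD nums idx 0 < fa)
      else finalizeA fa idx
        ((PySem.List.pyRange idx n 1).foldl (stepS nums) (true, 0, -1, idx)) := by
  conv_lhs => rw [aux, auxF]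
  by_cases h1 : idx = n
  · simp [h1]
  · by_cases h2 : n - idx = 2
    · simp only [if_neg h1, if_pos h2]
    · simp only [if_neg h1, if_neg h2]
      by_cases hab : n ≤ idx
      · rw [PySem.List.pyRange_one_eq_nil hab]
        rfl
      · rw [foldl_stepA_congr nums (auxF ((n - idx).toNat) nums) (recS nums) n idx
            (fun fa' a' b' ha hb => auxF_fuel ((b' - a').toNat) nums fa' a' b' rfl
              ((n - idx).toNat) (by omega))
            ((n - idx).toNat) idx rfl le_rfl true 0 (-1) idx le_rfl]
        rfl

-- A's value is B's finalize applied to the frame A's scan state would form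
theorem aux_as_finalize (nums : List Int) (fa idx n : Int) :
    aux nums fa idx n =
      finalizeB nums
        (fa, idx,
          (((PySem.List.pyRange idx n 1).foldl (stepS nums) (true, 0, -1, idx)).1,
           ((PySem.List.pyRange idx n 1).foldl (stepS nums) (true, 0, -1, idx)).2.1,
           ((PySem.List.pyRange idx n 1).foldl (stepS nums) (true, 0, -1, idx)).2.2.1,
           ((PySem.List.pyRange idx n 1).foldl (stepS nums) (true, 0, -1, idx)).2.2.2)) n := by
  rw [aux_unfold]
  set st := (PySem.List.pyRange idx n 1).foldl (stepS nums) (true, 0, -1, idx) with hst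
  obtain ⟨a, s, o, j⟩ := st
  simp [finalizeA, finalizeB]

-- the simulation invariant: each frame's stored state is exactly what A's scan of
-- [start, i) computes from a fresh state; consecutive frames are linked parent→child
-- parent→child link: the top frame is closed; an inner frame is open and its child
-- starts right after the opener, carrying the opener's value as its father
def linkP (f : BFrame) : List BFrame → Prop
  | [] => f.2.2.2.2.1 = -1
  | f' :: _ => 0 < f.2.2.2.2.1 ∧ f'.1 = f.2.2.2.2.1 ∧ f'.2.1 = f.2.2.2.2.2 + 1

def chainP (nums : List Int) (i : Int) : List BFrame → Prop
  | [] => True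
  | f :: rest =>
      (PySem.List.pyRange f.2.1 i 1).foldl (stepS nums) (true, 0, -1, f.2.1) = f.2.2
      ∧ f.2.1 ≤ i
      ∧ linkP f rest
      ∧ chainP nums i rest


-- extend A's scan of [ix, i) by the element at i
theorem foldl_extend (nums : List Int) (ix i : Int) (hix : ix ≤ i)
    (init : Bool × Int × Int × Int) :
    (PySem.List.pyRange ix (i+1) 1).foldl (stepS nums) init
      = stepS nums ((PySem.List.pyRange ix i 1).foldl (stepS nums) init) i := by
  rw [PySem.List.pyRange_one_succ_right hix, List.foldl_append]
  simp

-- closing a matched frame: A's step value is B's closed frame, the recursive call being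
-- the finalization of the child frame recorded on the stack
theorem close_state (nums : List Int) (i x : Int) (hx : x = PySem.List.pyGetD nums i 0)
    (hpos : ¬ x < 0) (fa ix : Int) (ans : Bool) (total op j : Int) (t : List BFrame)
    (hc : chainP nums i ((fa, ix, ans, total, op, j) :: t)) (hop : op = x) :
    stepS nums (ans, total, op, j) i
      = (ans && finalizeB nums (t.headD (0, 0, true, 0, -1, 0)) i, total + x, -1, i) := by
  rw [chainP] at hc
  dsimp only at hc
  obtain ⟨hst, hix, hlink, ht⟩ := hc
  cases t with
  | nil =>
    rw [linkP] at hlink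
    dsimp only at hlink
    omega
  | cons c t' =>
    obtain ⟨cfa, cix, cans, ctotal, cop, cj⟩ := c
    rw [linkP] at hlink
    dsimp only at hlink
    obtain ⟨hop0, hcfa, hcix⟩ := hlink
    rw [chainP] at ht
    dsimp only at ht
    obtain ⟨hcst, hcix2, _, _⟩ := ht
    show stepA (recS nums) nums (ans, total, op, j) i = _
    rw [stepA_close (recS nums) nums ans total op j i
        (fun hh => hpos (hx ▸ hh.1)) (by rw [← hx]; exact hop.symm)]
    rw [← hx]
    show (ans && aux nums op (j+1) i, total + x, -1, i) = _
    rw [aux_as_finalize nums op (j+1) i]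
    simp only [List.headD_cons]
    subst hcfa hcix
    rw [hcst]

-- the head of a successful close keeps its father and start fields
theorem closeFrom_head (nums : List Int) (x i : Int) :
    ∀ (t fs : List BFrame), closeFrom nums x i t = some fs →
      fs.head?.map (fun f => (f.1, f.2.1)) = t.head?.map (fun f => (f.1, f.2.1)) := by
  intro t fs hcf
  cases t with
  | nil => simp [closeFrom] at hcf
  | cons c t' =>
    obtain ⟨cfa, cix, cans, ctotal, cop, cj⟩ := c
    rw [closeFrom] at hcf
    by_cases hop : cop = x
    · rw [if_pos hop] at hcf
      obtain rfl := Option.some.injEq .. ▸ hcf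
      simp
    · rw [if_neg hop] at hcf
      cases hcf2 : closeFrom nums x i t' with
      | none => rw [hcf2] at hcf; simp at hcf
      | some fs' =>
        rw [hcf2] at hcf
        simp only [Option.map_some, Option.some.injEq] at hcf
        rw [← hcf]
        simp

theorem chain_preserved_open (nums : List Int) (i x : Int)
    (hx : x = PySem.List.pyGetD nums i 0) (hneg : x < 0) :
    ∀ (frames : List BFrame), frames ≠ [] → chainP nums i frames →
      chainP nums (i+1) (openLast x i frames) := by
  intro frames
  induction frames with
  | nil => intro h _; exact absurd rfl h
  | cons f rest ih =>
    intro _ hc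
    rw [chainP] at hc
    obtain ⟨hst, hix, hlink, hrest⟩ := hc
    obtain ⟨fa, ix, ans, total, op, j⟩ := f
    dsimp only at hst hix hlink
    cases rest with
    | nil =>
      rw [linkP] at hlink
      dsimp only at hlink
      subst hlink
      show chainP nums (i+1) [(fa, ix, ans, total, -x, i), (-x, i+1, true, 0, -1, i+1)]
      rw [chainP]
      dsimp only
      refine ⟨?_, by omega, ?_, ?_⟩
      · rw [foldl_extend nums ix i hix, hst]
        show stepA (recS nums) nums (ans, total, -1, j) i = _
        rw [stepA_open (recS nums) nums ans total (-1) j i ⟨hx ▸ hneg, rfl⟩, ← hx, neg_one_mul]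
      · rw [linkP]
        dsimp only
        exact ⟨by omega, rfl, rfl⟩
      · rw [chainP]
        dsimp only
        refine ⟨?_, by omega, ?_, trivial⟩
        · rw [PySem.List.pyRange_one_eq_nil le_rfl]
          rfl
        · rw [linkP]
      | cons g t =>
      show chainP nums (i+1) ((fa, ix, ans, total, op, j) :: openLast x i (g :: t))
      rw [chainP]
      dsimp only
      rw [linkP] at hlink
      dsimp only at hlink
      refine ⟨?_, by omega, ?_, ih (by simp) hrest⟩
      · rw [foldl_extend nums ix i hix, hst]
        exact stepA_skip (recS nums) nums ans total op j i
          (fun hh => by omega) (fun hh => by rw [← hx] at hh; omega)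
      · obtain ⟨gfa, gix, gans, gtotal, gop, gj⟩ := g
        cases t with
        | nil =>
          show linkP _ ((gfa, gix, gans, gtotal, -x, i) :: _)
          rw [linkP]
          dsimp only
          exact ⟨hlink.1, hlink.2.1, hlink.2.2⟩
        | cons h t' =>
          show linkP _ ((gfa, gix, gans, gtotal, gop, gj) :: _)
          rw [linkP]
          dsimp only
          exact hlink

theorem chain_preserved_skip (nums : List Int) (i x : Int)
    (hx : x = PySem.List.pyGetD nums i 0) (hpos : ¬ x < 0) :
    ∀ (frames : List BFrame), closeFrom nums x i frames = none → chainP nums i frames →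
      chainP nums (i+1) frames := by
  intro frames
  induction frames with
  | nil => intro _ _; trivial
  | cons f rest ih =>
    intro hnone hc
    rw [chainP] at hc
    obtain ⟨hst, hix, hlink, hrest⟩ := hc
    obtain ⟨fa, ix, ans, total, op, j⟩ := f
    dsimp only at hst hix hlink
    rw [closeFrom] at hnone
    by_cases hop : op = x
    · rw [if_pos hop] at hnone
      simp at hnone
    · rw [if_neg hop] at hnone
      have hrn : closeFrom nums x i rest = none := by
        cases hr : closeFrom nums x i rest with
        | none => rfl
        | some fs => rw [hr] at hnone; simp at hnone
      rw [chainP]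
      dsimp only
      refine ⟨?_, by omega, hlink, ih hrn hrest⟩
      rw [foldl_extend nums ix i hix, hst]
      exact stepA_skip (recS nums) nums ans total op j i
        (fun hh => hpos (by rw [hx]; exact hh.1))
        (fun hh => hop (by rw [← hx] at hh; exact hh.symm))

theorem chain_preserved_close (nums : List Int) (i x : Int)
    (hx : x = PySem.List.pyGetD nums i 0) (hpos : ¬ x < 0) :
    ∀ (frames fs : List BFrame), closeFrom nums x i frames = some fs → chainP nums i frames →
      chainP nums (i+1) fs := by
  intro frames
  induction frames with
  | nil => intro fs h; simp [closeFrom] at h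
  | cons f rest ih =>
    intro fs hsome hc
    have hc' := hc
    rw [chainP] at hc
    obtain ⟨hst, hix, hlink, hrest⟩ := hc
    obtain ⟨fa, ix, ans, total, op, j⟩ := f
    dsimp only at hst hix hlink
    rw [closeFrom] at hsome
    by_cases hop : op = x
    · rw [if_pos hop] at hsome
      obtain rfl : _ = fs := Option.some.inj hsome
      rw [chainP]
      dsimp only
      refine ⟨?_, by omega, by rw [linkP], trivial⟩
      rw [foldl_extend nums ix i hix, hst]
      exact close_state nums i x hx hpos fa ix ans total op j rest hc' hop
    · rw [if_neg hop] at hsome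
      cases hr : closeFrom nums x i rest with
      | none => rw [hr] at hsome; simp at hsome
      | some fs' =>
        rw [hr] at hsome
        simp only [Option.map_some, Option.some.injEq] at hsome
        subst hsome
        rw [chainP]
        dsimp only
        refine ⟨?_, by omega, ?_, ih fs' hr hrest⟩
        · rw [foldl_extend nums ix i hix, hst]
          exact stepA_skip (recS nums) nums ans total op j i
            (fun hh => hpos (by rw [hx]; exact hh.1))
            (fun hh => hop (by rw [← hx] at hh; exact hh.symm))
        · cases rest with
          | nil => simp [closeFrom] at hr
          | cons c t' =>
            have hh := closeFrom_head nums x i (c :: t') fs' hr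
            cases fs' with
            | nil => simp at hh
            | cons f' fs'' =>
              simp only [List.head?_cons, Option.map_some, Option.some.injEq, Prod.mk.injEq] at hh
              rw [linkP] at hlink ⊢
              dsimp only at hlink ⊢
              exact ⟨hlink.1, hh.1 ▸ hlink.2.1, hh.2 ▸ hlink.2.2⟩

-- the main simulation: from any chained stack, finishing B's pass and finalizing the
-- bottom frame equals finalizing the bottom frame with A's scan continued to n
theorem simB (nums : List Int) (n : Int) :
    ∀ (m : Nat) (i : Int), (n - i).toNat = m →
      ∀ (f0 : BFrame) (rest : List BFrame), chainP nums i (f0 :: rest) →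
      finalizeB nums
          (((PySem.List.pyRange i n 1).foldl (stepB nums) (f0 :: rest)).headD
            (0, 0, true, 0, -1, 0)) n
        = finalizeB nums
            (f0.1, f0.2.1,
              (((PySem.List.pyRange i n 1).foldl (stepS nums) (f0.2.2.1, f0.2.2.2.1, f0.2.2.2.2.1, f0.2.2.2.2.2)).1,
               ((PySem.List.pyRange i n 1).foldl (stepS nums) (f0.2.2.1, f0.2.2.2.1, f0.2.2.2.2.1, f0.2.2.2.2.2)).2.1,
               ((PySem.List.pyRange i n 1).foldl (stepS nums) (f0.2.2.1, f0.2.2.2.1, f0.2.2.2.2.1, f0.2.2.2.2.2)).2.2.1,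
               ((PySem.List.pyRange i n 1).foldl (stepS nums) (f0.2.2.1, f0.2.2.2.1, f0.2.2.2.2.1, f0.2.2.2.2.2)).2.2.2)) n := by
  intro m
  induction m with
  | zero =>
    intro i hm f0 rest hc
    rw [PySem.List.pyRange_one_eq_nil (by omega)]
    obtain ⟨fa, ix, ans, total, op, j⟩ := f0
    simp
  | succ m ih =>
    intro i hm f0 rest hc
    have hin : i < n := by omega
    obtain ⟨fa, ix, ans, total, op, j⟩ := f0
    rw [PySem.List.pyRange_one_cons hin]
    simp only [List.foldl_cons]
    set x := PySem.List.pyGetD nums i 0 with hxdef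
    rw [show stepB nums ((fa, ix, ans, total, op, j) :: rest) i
        = (if x < 0 then openLast x i ((fa, ix, ans, total, op, j) :: rest)
           else match closeFrom nums x i ((fa, ix, ans, total, op, j) :: rest) with
                | some fs => fs
                | none => (fa, ix, ans, total, op, j) :: rest) from rfl]
    have hchainparts := hc
    rw [chainP] at hchainparts
    obtain ⟨hst, hix, hlink, hrest⟩ := hchainparts
    dsimp only at hst hix hlink
    by_cases hneg : x < 0
    · rw [if_pos hneg]
      have hnew := chain_preserved_open nums i x hxdef hneg
        ((fa, ix, ans, total, op, j) :: rest) (by simp) hc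
      cases rest with
      | nil =>
        rw [linkP] at hlink
        dsimp only at hlink
        subst hlink
        rw [show stepS nums (ans, total, -1, j) i = (ans, total, -x, i) from by
          rw [show stepS nums (ans, total, -1, j) i
              = stepA (recS nums) nums (ans, total, -1, j) i from rfl,
            stepA_open (recS nums) nums ans total (-1) j i ⟨hxdef ▸ hneg, rfl⟩, ← hxdef,
            neg_one_mul]]
        exact ih (i+1) (by omega) (fa, ix, ans, total, -x, i)
          [(-x, i+1, true, 0, -1, i+1)] hnew
      | cons g t =>
        rw [linkP] at hlink
        dsimp only at hlink
        rw [show stepS nums (ans, total, op, j) i = (ans, total, op, j) from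
          stepA_skip (recS nums) nums ans total op j i
            (fun hh => by omega) (fun hh => by rw [← hxdef] at hh; omega)]
        exact ih (i+1) (by omega) (fa, ix, ans, total, op, j)
          (openLast x i (g :: t)) hnew
    · rw [if_neg hneg]
      cases hcf : closeFrom nums x i ((fa, ix, ans, total, op, j) :: rest) with
      | none =>
        have hopne : op ≠ x := by
          intro hop
          rw [closeFrom, if_pos hop] at hcf
          simp at hcf
        have hnew := chain_preserved_skip nums i x hxdef hneg
          ((fa, ix, ans, total, op, j) :: rest) hcf hc
        rw [show stepS nums (ans, total, op, j) i = (ans, total, op, j) from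
          stepA_skip (recS nums) nums ans total op j i
            (fun hh => hneg (by rw [hxdef]; exact hh.1))
            (fun hh => hopne (by rw [← hxdef] at hh; exact hh.symm))]
        exact ih (i+1) (by omega) (fa, ix, ans, total, op, j) rest hnew
      | some fs =>
        have hnew := chain_preserved_close nums i x hxdef hneg
          ((fa, ix, ans, total, op, j) :: rest) fs hcf hc
        rw [closeFrom] at hcf
        by_cases hop : op = x
        · rw [if_pos hop] at hcf
          obtain rfl : _ = fs := Option.some.inj hcf
          rw [show stepS nums (ans, total, op, j) i
              = (ans && finalizeB nums (rest.headD (0, 0, true, 0, -1, 0)) i, total + x, -1, i) from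
            close_state nums i x hxdef hneg fa ix ans total op j rest hc hop]
          exact ih (i+1) (by omega)
            (fa, ix, ans && finalizeB nums (rest.headD (0, 0, true, 0, -1, 0)) i, total + x, -1, i)
            [] hnew
        · rw [if_neg hop] at hcf
          cases hr : closeFrom nums x i rest with
          | none => rw [hr] at hcf; simp at hcf
          | some fs' =>
            rw [hr] at hcf
            simp only [Option.map_some, Option.some.injEq] at hcf
            subst hcf
            rw [show stepS nums (ans, total, op, j) i = (ans, total, op, j) from
              stepA_skip (recS nums) nums ans total op j i
                (fun hh => hneg (by rw [hxdef]; exact hh.1))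
                (fun hh => hop (by rw [← hxdef] at hh; exact hh.symm))]
            exact ih (i+1) (by omega) (fa, ix, ans, total, op, j) fs' hnew

theorem ports_equal (nums : List Int) (father idx n : Int) :
    aux nums father idx n = aux_alt nums father idx n := by
  rw [aux_as_finalize nums father idx n]
  unfold aux_alt
  rw [simB nums n ((n - idx).toNat) idx rfl (father, idx, true, 0, -1, idx) [] (by
    rw [chainP]
    dsimp only
    refine ⟨?_, le_rfl, by rw [linkP], trivial⟩
    rw [PySem.List.pyRange_one_eq_nil le_rfl]
    rfl)]

-- ===== VERDICT (by name: the statement is the Claim_ definition above) =====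
theorem aux_spec : Claim_equal_aux := by
  intro nums father idx n _ _
  unfold Spec_aux
  exact ports_equal nums father idx n
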